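-- pv_equiv track=rewrite | github.com/Suprawich/Python | Comp Prog/delivery.py | get_item_count
-- ===== SOURCE A (Python) =====
-- def get_item_count(sending_addresses) :
--   '''
--   ฟังก์ชันนี้คืน dict {เลขที่บ้าน: จำนวนของที่ต้องส่งให้}
--   โดย sending_addresses คือ list [เลขที่บ้านที่จะส่งของหนึ่งชิ้น,...]
--
--   EX get_item_count(['10/000', '00/001', '00/011', '00/011', '00/009']) จะ return {'10/000' : 1, '00/001' : 1, '00/011' : 2, '00/009' : 1}
--   '''
--   address_num = {}
--   for address in sending_addresses:
--       address_num[address] = 0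
--   for address in sending_addresses:
--       if address in address_num:
--           address_num[address] += 1
--   return address_num
-- ===== SOURCE B (Python) =====
-- def get_item_count(sending_addresses):
--     # one comprehension: distinct addresses in first-appearance order, each paired with its count
--     return {a: sending_addresses.count(a) for a in dict.fromkeys(sending_addresses)}
-- ===== Notes on version B (the rewrite author's own statement) =====
-- stated objective: simpler
-- what changed: Replaces A's two dict-mutation passes (zero all keys, then increment) with a single comprehension over the deduplicated keys (dict.fromkeys), pairing each distinct address with list.count; no accumulator dict is mutated.
import Mathlib
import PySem

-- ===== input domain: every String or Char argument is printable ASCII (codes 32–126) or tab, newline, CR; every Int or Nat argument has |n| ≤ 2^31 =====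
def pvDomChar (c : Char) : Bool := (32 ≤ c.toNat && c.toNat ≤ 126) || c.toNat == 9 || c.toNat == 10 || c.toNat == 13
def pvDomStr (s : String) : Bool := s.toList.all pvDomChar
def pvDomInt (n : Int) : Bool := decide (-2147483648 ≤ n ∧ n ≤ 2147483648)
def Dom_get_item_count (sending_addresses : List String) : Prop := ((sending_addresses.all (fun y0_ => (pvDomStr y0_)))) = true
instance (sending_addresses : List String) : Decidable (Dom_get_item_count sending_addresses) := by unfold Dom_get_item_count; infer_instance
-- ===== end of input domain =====

-- B replaces A's two dict-mutation passes with one comprehension over the deduplicated keys (same values, same key order).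

-- ===== PORT A =====
def get_item_count (sending_addresses : List String) : List (String × Int) :=
  let address_num :=
    sending_addresses.foldl (fun d address => d.insert address (0 : Int)) PySem.Dict.empty
  let address_num :=
    sending_addresses.foldl
      (fun d address => if d.contains address then d.insert address (d.getD address 0 + 1) else d)
      address_num
  address_num.items

-- ===== PORT B =====
def get_item_count_alt (sending_addresses : List String) : List (String × Int) :=
  (PySem.List.dedup sending_addresses).map
    (fun a => (a, (sending_addresses.count a : Int)))

-- ===== PRECONDITION & SPEC =====
def Spec_get_item_count (sending_addresses : List String) (out : List (String × Int)) : Prop := out = get_item_count_alt sending_addresses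
instance (sending_addresses : List String) (out : List (String × Int)) : Decidable (Spec_get_item_count sending_addresses out) := by unfold Spec_get_item_count; infer_instance

-- ===== CLAIM (what is proved, stated in full; the proofs are below) =====
def Claim_equal_get_item_count : Prop := ∀ (sending_addresses : List String), Dom_get_item_count sending_addresses → Spec_get_item_count sending_addresses (get_item_count sending_addresses)

-- ===== LEMMAS AND PROOFS =====

-- A's second loop: since every element is already a key, the guard is always true.
theorem loop2_eq_unguarded (l : List String) (d : PySem.Dict String Int)
    (h : ∀ x ∈ l, d.contains x = true) :
    l.foldl (fun d a => if d.contains a then d.insert a (d.getD a 0 + 1) else d) d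
      = l.foldl (fun d a => d.insert a (d.getD a 0 + 1)) d := by
  induction l generalizing d with
  | nil => rfl
  | cons a l ih =>
    simp only [List.foldl_cons, h a (by simp)]
    simp only [if_pos]
    exact ih _ (fun x hx => by
      rw [PySem.Dict.contains_insert]
      simp [h x (List.mem_cons_of_mem _ hx)])

-- A's first loop leaves every value at 0.
theorem getD_loop1_zero (l : List String) (d : PySem.Dict String Int) (v : String)
    (h : d.getD v 0 = 0) :
    (l.foldl (fun d a => d.insert a (0 : Int)) d).getD v 0 = 0 := by
  induction l generalizing d with
  | nil => exact h
  | cons a l ih =>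
    refine ih _ ?_
    rw [PySem.Dict.getD_insert]
    split_ifs <;> simp [h]

-- ===== VERDICT (by name: the statement is the Claim_ definition above) =====
theorem get_item_count_spec : Claim_equal_get_item_count := by
  intro xs _
  show get_item_count xs = get_item_count_alt xs
  unfold get_item_count get_item_count_alt
  simp only []
  set d1 := xs.foldl (fun d a => d.insert a (0 : Int)) PySem.Dict.empty with hd1
  have hkeys1 : d1.keys = PySem.Set.ofList xs := by
    rw [hd1, PySem.Dict.keys_foldl_insert]
    simp [PySem.Dict.keys_empty, PySem.Set.update_nil_left]
  have hmem1 : ∀ x ∈ xs, d1.contains x = true := by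
    intro x hx
    rw [PySem.Dict.contains_iff_mem_keys, hkeys1]
    exact (PySem.Set.mem_ofList _ _).2 hx
  rw [loop2_eq_unguarded xs d1 hmem1]
  set d2 := xs.foldl (fun d a => d.insert a (d.getD a 0 + 1)) d1 with hd2
  have hnd1 : d1.keys.Nodup := by
    rw [hd1]
    exact PySem.Dict.nodup_keys_foldl_insert _ _ _ (by simp [PySem.Dict.keys_empty])
  have hkeys2 : d2.keys = PySem.Set.ofList xs := by
    rw [hd2, PySem.Dict.keys_foldl_insert, hkeys1, PySem.Set.update_eq_append_filter]
    have : (PySem.Set.ofList xs).filter (fun y => !(PySem.Set.contains (PySem.Set.ofList xs) y)) = [] := by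
      rw [List.filter_eq_nil_iff]
      intro y hy
      simp
      exact (PySem.Set.mem_ofList _ _).1 hy
    rw [this, List.append_nil]
  have hnd2 : d2.keys.Nodup := by
    rw [hd2]; exact PySem.Dict.nodup_keys_foldl_insert _ _ _ hnd1
  have hval : ∀ v, d2.getD v 0 = (xs.count v : Int) := by
    intro v
    rw [hd2, PySem.Dict.getD_foldl_insert_add_one]
    rw [getD_loop1_zero xs PySem.Dict.empty v (by simp [PySem.Dict.getD_empty])]
    ring
  rw [PySem.Dict.items_eq_map_keys d2 hnd2 0, hkeys2, ← PySem.List.dedup_eq_ofList]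
  exact List.map_congr_left (fun a _ => by rw [hval a])
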